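-- pv_equiv track=rewrite | github.com/gminpark0117/Mix-Generator-Backend | atomix/renderers/mix_renderer.py | _split_lengths
-- ===== SOURCE A (Python) =====
-- def _split_lengths(total: int, parts: int) -> list[int]:
--     total = int(max(0, total))
--     parts = int(max(1, parts))
--     if total <= 0:
--         return []
--     base = total // parts
--     rem = total % parts
--     lengths = [base + (1 if i < rem else 0) for i in range(parts)]
--     return [x for x in lengths if x > 0]
-- ===== SOURCE B (Python) =====
-- def _split_lengths(total: int, parts: int) -> list[int]:
--     total = int(max(0, total))
--     parts = int(max(1, parts))
--     if total <= 0: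
--         return []
--     out = []
--     remaining = total
--     parts_left = parts
--     while parts_left > 0:
--         take = -(-remaining // parts_left)  # ceil(remaining / parts_left)
--         if take > 0:
--             out.append(take)
--         remaining -= take
--         parts_left -= 1
--     return out
-- ===== Notes on version B (the rewrite author's own statement) =====
-- stated objective: alternative
-- what changed: Replaces the precomputed base/remainder comprehension plus a final zero-filter pass with a single greedy loop that repeatedly takes ceil(remaining/parts_left) from a running remainder, appending only positive takes.
import Mathlib
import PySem

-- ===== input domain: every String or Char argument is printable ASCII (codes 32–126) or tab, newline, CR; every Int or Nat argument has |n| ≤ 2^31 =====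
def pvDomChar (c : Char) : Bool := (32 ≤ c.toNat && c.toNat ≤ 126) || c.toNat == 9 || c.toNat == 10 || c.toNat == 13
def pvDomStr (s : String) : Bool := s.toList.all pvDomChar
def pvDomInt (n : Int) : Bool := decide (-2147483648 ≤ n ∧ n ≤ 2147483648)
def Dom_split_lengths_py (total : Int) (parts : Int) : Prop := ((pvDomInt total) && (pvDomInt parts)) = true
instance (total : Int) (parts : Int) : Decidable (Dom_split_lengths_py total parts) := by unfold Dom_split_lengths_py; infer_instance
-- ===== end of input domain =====

-- B replaces A's precomputed base/remainder comprehension + final zero-filter with a greedy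
-- loop taking ceil(remaining/parts_left) each step (alternative decomposition, same cost).

-- ===== PORT A =====
def split_lengths_py (total : Int) (parts : Int) : List Int :=
  let total := max 0 total
  let parts := max 1 parts
  if total ≤ 0 then []
  else
    let base := PySem.Int.floordiv total parts
    let rem := PySem.Int.mod total parts
    let lengths := (PySem.List.pyRange 0 parts 1).map (fun i => base + if i < rem then 1 else 0)
    lengths.filter (fun x => decide (x > 0))

-- ===== PORT B =====
-- the while loop of Source B, recursing on parts_left
def greedyTake : Int → Nat → List Int
  | _, 0 => []
  | remaining, k+1 =>
    let take := -(PySem.Int.floordiv (-remaining) ((k : Int) + 1))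
    (if take > 0 then [take] else []) ++ greedyTake (remaining - take) k

def split_lengths_py_alt (total : Int) (parts : Int) : List Int :=
  let total := max 0 total
  let parts := max 1 parts
  if total ≤ 0 then [] else greedyTake total parts.toNat

-- ===== PRECONDITION & SPEC =====
def Spec_split_lengths_py (total : Int) (parts : Int) (out : List Int) : Prop := out = split_lengths_py_alt total parts
instance (total : Int) (parts : Int) (out : List Int) : Decidable (Spec_split_lengths_py total parts out) := by unfold Spec_split_lengths_py; infer_instance

-- ===== CLAIM (what is proved, stated in full; the proofs are below) =====
def Claim_equal_split_lengths_py : Prop := ∀ (total : Int) (parts : Int), Dom_split_lengths_py total parts → Spec_split_lengths_py total parts (split_lengths_py total parts)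

-- ===== LEMMAS AND PROOFS =====

-- the greedy loop yields q+1 on the first s slots and q afterwards, keeping positives
theorem greedyTake_canon : ∀ (k : Nat) (q : Int) (s : Nat), 0 ≤ q → s ≤ k →
    greedyTake (q * k + s) k =
      (List.replicate s (q + 1) ++ List.replicate (k - s) q).filter (fun x => decide (x > 0)) := by
  intro k
  induction k with
  | zero =>
    intro q s _ hs
    interval_cases s
    simp [greedyTake]
  | succ k ih =>
    intro q s hq hs
    have hb : (0 : Int) < (k : Int) + 1 := by positivity
    cases s with
    | zero =>
      have htake : -(PySem.Int.floordiv (-(q * ((k+1 : Nat) : Int) + ((0:Nat) : Int))) ((k : Int) + 1)) = q := by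
        rw [PySem.Int.neg_floordiv_neg_eq_iff_of_pos hb]
        constructor
        · push_cast
          nlinarith [Int.natCast_nonneg k]
        · push_cast; nlinarith
      simp only [greedyTake, htake]
      have harg : q * ((k+1 : Nat) : Int) + ((0:Nat) : Int) - q = q * (k : Int) + ((0:Nat) : Int) := by
        push_cast; ring
      rw [harg, ih q 0 hq (Nat.zero_le _)]
      simp only [List.replicate_succ, Nat.sub_zero, List.replicate_zero, List.nil_append,
        List.filter_cons]
      by_cases hq0 : q > 0 <;> simp [hq0]
    | succ t =>
      have ht : t ≤ k := Nat.lt_succ_iff.mp hs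
      have htake : -(PySem.Int.floordiv (-(q * ((k+1 : Nat) : Int) + ((t+1:Nat) : Int))) ((k : Int) + 1)) = q + 1 := by
        rw [PySem.Int.neg_floordiv_neg_eq_iff_of_pos hb]
        constructor
        · push_cast
          nlinarith [Int.natCast_nonneg k, Int.natCast_nonneg t]
        · push_cast
          have : ((t : Int) + 1) ≤ (k : Int) + 1 := by exact_mod_cast Nat.succ_le_succ ht
          nlinarith
      simp only [greedyTake, htake]
      have harg : q * ((k+1 : Nat) : Int) + ((t+1:Nat) : Int) - (q + 1) = q * (k : Int) + ((t:Nat) : Int) := by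
        push_cast; ring
      rw [harg, ih q t hq ht]
      have hpos : q + 1 > 0 := by omega
      simp [List.replicate_succ, hpos, Nat.succ_sub_succ]

-- A's comprehension over range(parts) is replicate rem (base+1) ++ replicate (parts-rem) base
theorem map_range_split : ∀ (pk : Nat) (rem : Nat) (base : Int), rem ≤ pk →
    (PySem.List.pyRange 0 (pk : Int) 1).map (fun i => base + if i < (rem : Int) then 1 else 0) =
      List.replicate rem (base + 1) ++ List.replicate (pk - rem) base := by
  intro pk
  induction pk with
  | zero =>
    intro rem base hr
    interval_cases rem
    simp [PySem.List.pyRange_one_eq_nil]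
  | succ pk ih =>
    intro rem base hr
    have hstep : PySem.List.pyRange 0 ((pk+1 : Nat) : Int) 1
        = PySem.List.pyRange 0 (pk : Int) 1 ++ [(pk : Int)] := by
      have h1 : ((pk+1 : Nat) : Int) = (pk : Int) + 1 := by push_cast; ring
      rw [h1, PySem.List.pyRange_one_succ_right (by positivity)]
    rw [hstep, List.map_append]
    rcases Nat.lt_or_eq_of_le hr with h | h
    · -- rem ≤ pk
      have hle : rem ≤ pk := Nat.lt_succ_iff.mp h
      rw [ih rem base hle]
      have hlast : ¬ ((pk : Int) < (rem : Int)) := by exact_mod_cast Nat.not_lt.mpr hle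
      simp only [List.map_cons, List.map_nil, if_neg hlast, add_zero]
      have h2 : pk + 1 - rem = (pk - rem) + 1 := by omega
      rw [h2, List.replicate_succ', List.append_assoc]
    · -- rem = pk + 1 : every index is below the bound
      subst h
      have hcongr : (PySem.List.pyRange 0 (pk : Int) 1).map
            (fun i => base + if i < ((pk+1 : Nat) : Int) then 1 else 0)
          = (PySem.List.pyRange 0 (pk : Int) 1).map
            (fun i => base + if i < ((pk : Nat) : Int) then 1 else 0) := by
        apply List.map_congr_left
        intro i hi
        have hib : 0 ≤ i ∧ i < (pk : Int) := PySem.List.mem_pyRange_one.mp hi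
        have h1 : i < ((pk : Nat) : Int) := hib.2
        have h2 : i < ((pk+1 : Nat) : Int) := by push_cast; push_cast at h1; omega
        rw [if_pos h1, if_pos h2]
      rw [hcongr, ih pk base (le_refl pk)]
      have hlast : (pk : Int) < ((pk+1 : Nat) : Int) := by push_cast; omega
      simp only [List.map_cons, List.map_nil, if_pos hlast, Nat.sub_self,
        List.replicate_zero, List.append_nil]
      rw [← List.replicate_succ']

-- ===== VERDICT (by name: the statement is the Claim_ definition above) =====
theorem split_lengths_py_spec : Claim_equal_split_lengths_py := by
  intro total parts _
  unfold Spec_split_lengths_py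
  simp only [split_lengths_py, split_lengths_py_alt]
  by_cases hT : max 0 total ≤ 0
  · simp [hT]
  · simp only [if_neg hT]
    set T := max 0 total with hTdef
    set P := max 1 parts with hPdef
    have hT0 : 0 < T := lt_of_not_ge hT
    have hP0 : (0 : Int) < P := lt_of_lt_of_le one_pos (le_max_left 1 parts)
    have hpk : ((P.toNat : Nat) : Int) = P := Int.toNat_of_nonneg (le_of_lt hP0)
    have hrem0 : 0 ≤ PySem.Int.mod T P := PySem.Int.mod_nonneg T hP0
    have hremlt : PySem.Int.mod T P < P := PySem.Int.mod_lt T hP0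
    have hdm : PySem.Int.floordiv T P * P + PySem.Int.mod T P = T :=
      PySem.Int.floordiv_mul_add_mod T P
    have hbase0 : 0 ≤ PySem.Int.floordiv T P := by
      by_contra hneg
      have h1 : PySem.Int.floordiv T P ≤ -1 := by omega
      have h2 : PySem.Int.floordiv T P * P ≤ (-1) * P :=
        mul_le_mul_of_nonneg_right h1 (le_of_lt hP0)
      linarith
    have hs : ((PySem.Int.mod T P).toNat : Int) = PySem.Int.mod T P :=
      Int.toNat_of_nonneg hrem0
    have hsk : (PySem.Int.mod T P).toNat ≤ P.toNat := by omega
    have hA := map_range_split P.toNat (PySem.Int.mod T P).toNat (PySem.Int.floordiv T P) hsk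
    rw [hpk, hs] at hA
    have hB := greedyTake_canon P.toNat (PySem.Int.floordiv T P) (PySem.Int.mod T P).toNat hbase0 hsk
    rw [hpk, hs, hdm] at hB
    rw [hA, hB]
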